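-- pv_equiv track=rewrite | github.com/EthanGoss1/CodingWork | Classwork/ComputationalProblemSolving/AdHocVolim.py | compute_who_dies
-- ===== SOURCE A (Python) =====
-- def compute_who_dies(k, n, rounds):
--     current_player = k
--     elapsed_time = 0
--
--     for person in rounds:
--         elapsed_time += person[0]
--         #If it's been 3 minutes, kill someone
--         if elapsed_time >= 210:
--             break
--         #If it hasn't, either pass or stay
--         #Only pass if true, stay otherwise
--         if person[1] == 'T':
--             # Pass to next player, will be 8 players per game
--             current_player = (current_player % 8) + 1  # wrap around 1-8
--
--     return current_player
-- ===== SOURCE B (Python) =====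
-- def compute_who_dies(k, n, rounds):
--     # Stage 1: collect the pass/stay flags of rounds strictly before the 210s cutoff.
--     pre = []
--     elapsed = 0
--     for t, flag in rounds:
--         elapsed += t
--         if elapsed >= 210:
--             break
--         pre.append(flag)
--     # Stage 2: count the passes and apply them in one closed-form modular step.
--     m = pre.count('T')
--     if m == 0:
--         return k
--     return (k % 8 + m - 1) % 8 + 1
-- ===== Notes on version B (the rewrite author's own statement) =====
-- stated objective: simpler
-- what changed: B stages the work: it first collects the flags of the rounds before the 210-second cutoff into a list, then counts 'T' in that list and applies all passes at once with one closed-form modular expression, instead of A's single loop that re-updates the current player every round.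
import Mathlib
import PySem

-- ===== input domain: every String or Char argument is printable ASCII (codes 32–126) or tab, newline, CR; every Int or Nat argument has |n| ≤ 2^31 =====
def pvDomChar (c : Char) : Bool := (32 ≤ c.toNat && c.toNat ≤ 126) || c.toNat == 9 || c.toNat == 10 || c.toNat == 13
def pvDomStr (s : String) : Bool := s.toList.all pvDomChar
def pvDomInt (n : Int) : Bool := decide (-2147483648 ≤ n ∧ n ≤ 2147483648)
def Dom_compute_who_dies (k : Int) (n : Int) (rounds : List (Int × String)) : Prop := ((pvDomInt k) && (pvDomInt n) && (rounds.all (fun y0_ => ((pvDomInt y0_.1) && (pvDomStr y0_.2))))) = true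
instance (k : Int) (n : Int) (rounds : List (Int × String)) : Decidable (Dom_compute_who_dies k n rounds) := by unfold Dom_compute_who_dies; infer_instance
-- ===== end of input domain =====

-- B first collects the flags of the rounds before the cutoff, then counts 'T' and applies all passes in one closed-form modular step (objective: simpler).

-- ===== PORT A =====
-- A's loop: carry current_player and elapsed_time through the rounds.
def cwdA_loop (rounds : List (Int × String)) (cur : Int) (et : Int) : Int :=
  match rounds with
  | [] => cur
  | p :: rest =>
    let et' := et + p.1
    if et' ≥ 210 then cur
    else if p.2 = "T" then cwdA_loop rest (PySem.Int.mod cur 8 + 1) et'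
    else cwdA_loop rest cur et'

def compute_who_dies (k : Int) (n : Int) (rounds : List (Int × String)) : Int :=
  cwdA_loop rounds k 0

-- ===== PORT B =====
-- Stage 1 of B: the list of flags of the rounds strictly before the 210s cutoff.
def cwdB_prefixFlags (rounds : List (Int × String)) (et : Int) : List String :=
  match rounds with
  | [] => []
  | p :: rest =>
    if et + p.1 ≥ 210 then []
    else p.2 :: cwdB_prefixFlags rest (et + p.1)

def compute_who_dies_alt (k : Int) (n : Int) (rounds : List (Int × String)) : Int :=
  let pre := cwdB_prefixFlags rounds 0
  let m : Int := PySem.List.count pre "T"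
  if m = 0 then k
  else PySem.Int.mod (PySem.Int.mod k 8 + m - 1) 8 + 1

-- ===== PRECONDITION & SPEC =====
def Spec_compute_who_dies (k : Int) (n : Int) (rounds : List (Int × String)) (out : Int) : Prop := out = compute_who_dies_alt k n rounds
instance (k : Int) (n : Int) (rounds : List (Int × String)) (out : Int) : Decidable (Spec_compute_who_dies k n rounds out) := by unfold Spec_compute_who_dies; infer_instance

-- ===== CLAIM (what is proved, stated in full; the proofs are below) =====
def Claim_equal_compute_who_dies : Prop := ∀ (k : Int) (n : Int) (rounds : List (Int × String)), Dom_compute_who_dies k n rounds → Spec_compute_who_dies k n rounds (compute_who_dies k n rounds)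

-- ===== LEMMAS AND PROOFS =====

theorem pymod8_eq (a : Int) : PySem.Int.mod a 8 = a % 8 :=
  PySem.Int.mod_eq_emod_of_pos (by norm_num)

-- main invariant: A's loop result is the closed form of B's 'T'-count over the prefix flags
theorem cwd_main (rounds : List (Int × String)) (cur et : Int) :
    cwdA_loop rounds cur et =
      (if ((cwdB_prefixFlags rounds et).count "T" : Int) = 0 then cur
       else PySem.Int.mod (PySem.Int.mod cur 8
              + ((cwdB_prefixFlags rounds et).count "T" : Int) - 1) 8 + 1) := by
  induction rounds generalizing cur et with
  | nil => simp [cwdA_loop, cwdB_prefixFlags]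
  | cons p rest ih =>
    by_cases h1 : et + p.1 ≥ 210
    · simp [cwdA_loop, cwdB_prefixFlags, h1]
    · by_cases h2 : p.2 = "T"
      · have hA : cwdA_loop (p :: rest) cur et
            = cwdA_loop rest (PySem.Int.mod cur 8 + 1) (et + p.1) := by
          simp only [cwdA_loop, if_neg h1, h2, ite_true]
        have hB : cwdB_prefixFlags (p :: rest) et
            = "T" :: cwdB_prefixFlags rest (et + p.1) := by
          simp only [cwdB_prefixFlags, if_neg h1, h2]
        rw [hA, ih, hB]
        simp only [List.count_cons_self, pymod8_eq]
        set c : Nat := (cwdB_prefixFlags rest (et + p.1)).count "T" with hcdef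
        have h1c : ¬ (((c + 1 : Nat) : Int) = 0) := by positivity
        rw [if_neg h1c]
        rcases Nat.eq_zero_or_pos c with hz | hz
        · rw [hz]; norm_num
        · have hnz : ¬ ((c : Int) = 0) := by exact_mod_cast Nat.pos_iff_ne_zero.mp hz
          rw [if_neg hnz]; push_cast; omega
      · have hA : cwdA_loop (p :: rest) cur et = cwdA_loop rest cur (et + p.1) := by
          simp only [cwdA_loop, if_neg h1, if_neg h2]
        have hB : cwdB_prefixFlags (p :: rest) et = p.2 :: cwdB_prefixFlags rest (et + p.1) := by
          simp only [cwdB_prefixFlags, if_neg h1]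
        rw [hA, ih, hB, List.count_cons_of_ne h2]

-- ===== VERDICT (by name: the statement is the Claim_ definition above) =====
theorem compute_who_dies_spec : Claim_equal_compute_who_dies := by
  intro k n rounds _
  unfold Spec_compute_who_dies compute_who_dies compute_who_dies_alt
  simpa [PySem.List.count_eq, pymod8_eq] using cwd_main rounds k 0
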